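-- pv_equiv track=rewrite | github.com/nchn471/Linear-Programing-Solver | gui/input/view_input/main.py | mapping
-- ===== SOURCE A (Python) =====
-- def mapping(input_str):
--     mapping_dict = {
--         "!=": "≠",
--         "<=": "≤",
--         ">=": "≥",
--     }
--
--     for key, value in mapping_dict.items():
--         input_str = input_str.replace(key, value)
--
--     return input_str
-- ===== SOURCE B (Python) =====
-- def mapping(input_str):
--     # single left-to-right scan with two-character lookahead instead of three full replace passes
--     out = []
--     i = 0
--     n = len(input_str)
--     while i < n:
--         c = input_str[i]
--         d = input_str[i + 1] if i + 1 < n else ""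
--         if c == "!" and d == "=":
--             out.append("\u2260")
--             i += 2
--         elif c == "<" and d == "=":
--             out.append("\u2264")
--             i += 2
--         elif c == ">" and d == "=":
--             out.append("\u2265")
--             i += 2
--         else:
--             out.append(c)
--             i += 1
--     return "".join(out)
-- ===== Notes on version B (the rewrite author's own statement) =====
-- stated objective: alternative
-- what changed: B replaces the three sequential full-string replace passes with a single left-to-right scan that uses a two-character lookahead and builds the output once.
import Mathlib
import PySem

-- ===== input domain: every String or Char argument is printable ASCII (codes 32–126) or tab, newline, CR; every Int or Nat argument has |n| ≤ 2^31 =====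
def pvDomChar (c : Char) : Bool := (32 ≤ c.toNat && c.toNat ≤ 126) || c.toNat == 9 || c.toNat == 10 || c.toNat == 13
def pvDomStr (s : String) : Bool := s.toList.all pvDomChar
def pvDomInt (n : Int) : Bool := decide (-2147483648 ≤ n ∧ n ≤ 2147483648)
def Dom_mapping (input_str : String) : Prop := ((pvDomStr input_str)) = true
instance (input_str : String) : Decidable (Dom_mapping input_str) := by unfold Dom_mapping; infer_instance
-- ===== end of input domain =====

-- B replaces A's three sequential full-string replace passes with one left-to-right
-- two-character-lookahead scan building the output once (objective: alternative).

-- ===== PORT A =====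
-- A iterates over the dict's items, applying str.replace for each (key, value) in insertion order.
def mapping (input_str : String) : String :=
  [("!=", "≠"), ("<=", "≤"), (">=", "≥")].foldl
    (fun s kv => PySem.Str.replace s kv.1 kv.2) input_str

-- ===== PORT B =====
-- B's while-loop over index i with two-character lookahead, as structural recursion on the chars.
def mappingScan : List Char → List Char
  | c :: d :: t =>
      if c = '!' ∧ d = '=' then '≠' :: mappingScan t
      else if c = '<' ∧ d = '=' then '≤' :: mappingScan t
      else if c = '>' ∧ d = '=' then '≥' :: mappingScan t
      else c :: mappingScan (d :: t)
  | l => l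

def mapping_alt (input_str : String) : String :=
  String.ofList (mappingScan input_str.toList)

-- ===== PRECONDITION & SPEC =====
def Spec_mapping (input_str : String) (out : String) : Prop := out = mapping_alt input_str
instance (input_str : String) (out : String) : Decidable (Spec_mapping input_str out) := by unfold Spec_mapping; infer_instance

-- ===== CLAIM (what is proved, stated in full; the proofs are below) =====
def Claim_equal_mapping : Prop := ∀ (input_str : String), Dom_mapping input_str → Spec_mapping input_str (mapping input_str)

-- ===== LEMMAS AND PROOFS =====

-- recursive characterisation of one replace pass for a two-character pattern [a,b] → [r]
def rep2 (a b r : Char) : List Char → List Char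
  | c :: d :: t =>
      if c = a ∧ d = b then r :: rep2 a b r t else c :: rep2 a b r (d :: t)
  | l => l

theorem go_spec (a b r : Char) (fuel : Nat) (l acc : List Char) (h : l.length ≤ fuel) :
    PySem.Chars.replace.go [a, b] [r] fuel l acc = acc.reverse ++ rep2 a b r l := by
  induction fuel generalizing l acc with
  | zero =>
      have : l = [] := List.length_eq_zero_iff.mp (Nat.le_zero.mp h)
      subst this
      simp [PySem.Chars.replace.go, rep2]
  | succ fuel ih =>
      match l with
      | [] => simp [PySem.Chars.replace.go, rep2]
      | [c] =>
          have hpre : [a, b].isPrefixOf [c] = false := by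
            simp [List.isPrefixOf]
          simp only [PySem.Chars.replace.go, hpre, Bool.false_eq_true, if_false]
          rw [ih [] (c :: acc) (by simp)]
          simp [rep2]
      | c :: d :: t =>
          by_cases hm : c = a ∧ d = b
          · obtain ⟨rfl, rfl⟩ := hm
            have hpre : [c, d].isPrefixOf (c :: d :: t) = true := by
              simp [List.isPrefixOf]
            simp only [PySem.Chars.replace.go, hpre, if_true]
            have hdrop : List.drop [c, d].length (c :: d :: t) = t := rfl
            rw [hdrop, ih t ([r].reverse ++ acc) (by simp at h ⊢; omega)]
            simp [rep2]
          · have hpre : [a, b].isPrefixOf (c :: d :: t) = false := by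
              simp only [List.isPrefixOf, Bool.and_true, Bool.and_eq_false_iff,
                beq_eq_false_iff_ne, ne_eq]
              by_cases hc : a = c
              · right; intro hbd; exact hm ⟨hc.symm, hbd.symm⟩
              · left; exact hc
            simp only [PySem.Chars.replace.go, hpre, Bool.false_eq_true, if_false]
            rw [ih (d :: t) (c :: acc) (by simp at h ⊢; omega)]
            simp [rep2, hm]

theorem replace_eq_rep2 (a b r : Char) (l : List Char) :
    PySem.Chars.replace l [a, b] [r] = rep2 a b r l := by
  rw [PySem.Chars.replace]
  simp only [List.isEmpty, Bool.false_eq_true, if_false]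
  exact go_spec a b r l.length l [] (le_refl _)

-- a non-matching head passes through unchanged
theorem rep2_cons (a b r c : Char) (l : List Char) (h : ¬(c = a ∧ l.head? = some b)) :
    rep2 a b r (c :: l) = c :: rep2 a b r l := by
  match l with
  | [] => simp [rep2]
  | d :: t =>
      have : ¬(c = a ∧ d = b) := by simpa using h
      simp [rep2, this]

-- rep2 preserves whether the first character is '=' when neither a nor r is '='
theorem rep2_head_eq (a b r : Char) (ha : a ≠ '=') (hr : r ≠ '=') (l : List Char) :
    ((rep2 a b r l).head? = some '=') ↔ (l.head? = some '=') := by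
  match l with
  | [] => simp [rep2]
  | [c] => simp [rep2]
  | c :: d :: t =>
      by_cases hm : c = a ∧ d = b
      · simp [rep2, hm, hr, ha]
      · simp [rep2, hm]

-- the three composed passes equal the single scan
theorem rep3_eq_scan (l : List Char) :
    rep2 '>' '=' '≥' (rep2 '<' '=' '≤' (rep2 '!' '=' '≠' l)) = mappingScan l := by
  induction l using mappingScan.induct with
  | case1 c d t h ih =>
      obtain ⟨rfl, rfl⟩ := h
      have h1 : rep2 '!' '=' '≠' ('!' :: '=' :: t) = '≠' :: rep2 '!' '=' '≠' t := by
        simp [rep2]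
      rw [h1, rep2_cons '<' '=' '≤' '≠' _ (by simp),
          rep2_cons '>' '=' '≥' '≠' _ (by simp), ih]
      simp [mappingScan]
  | case2 c d t h0 h ih =>
      obtain ⟨rfl, rfl⟩ := h
      rw [rep2_cons '!' '=' '≠' '<' _ (by simp),
          rep2_cons '!' '=' '≠' '=' _ (by simp)]
      have h2 : rep2 '<' '=' '≤' ('<' :: '=' :: rep2 '!' '=' '≠' t) =
          '≤' :: rep2 '<' '=' '≤' (rep2 '!' '=' '≠' t) := by simp [rep2]
      rw [h2, rep2_cons '>' '=' '≥' '≤' _ (by simp), ih]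
      simp [mappingScan]
  | case3 c d t h0 h1 h ih =>
      obtain ⟨rfl, rfl⟩ := h
      rw [rep2_cons '!' '=' '≠' '>' _ (by simp),
          rep2_cons '!' '=' '≠' '=' _ (by simp),
          rep2_cons '<' '=' '≤' '>' _ (by simp),
          rep2_cons '<' '=' '≤' '=' _ (by simp)]
      have h3 : rep2 '>' '=' '≥' ('>' :: '=' :: rep2 '<' '=' '≤' (rep2 '!' '=' '≠' t)) =
          '≥' :: rep2 '>' '=' '≥' (rep2 '<' '=' '≤' (rep2 '!' '=' '≠' t)) := by simp [rep2]
      rw [h3, ih]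
      simp [mappingScan]
  | case4 c d t h1 h2 h3 ih =>
      have hd1 : ¬(c = '!' ∧ (d :: t).head? = some '=') := by simpa using h1
      have hhead1 : ((rep2 '!' '=' '≠' (d :: t)).head? = some '=') ↔ d = '=' := by
        rw [rep2_head_eq '!' '=' '≠' (by decide) (by decide)]; simp
      have hd2 : ¬(c = '<' ∧ (rep2 '!' '=' '≠' (d :: t)).head? = some '=') := by
        rw [hhead1]; exact fun hc => h2 hc
      have hhead2 : ((rep2 '<' '=' '≤' (rep2 '!' '=' '≠' (d :: t))).head? = some '=')
          ↔ d = '=' := by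
        rw [rep2_head_eq '<' '=' '≤' (by decide) (by decide)]; exact hhead1
      have hd3 : ¬(c = '>' ∧
          (rep2 '<' '=' '≤' (rep2 '!' '=' '≠' (d :: t))).head? = some '=') := by
        rw [hhead2]; exact fun hc => h3 hc
      rw [rep2_cons '!' '=' '≠' c _ hd1, rep2_cons '<' '=' '≤' c _ hd2,
          rep2_cons '>' '=' '≥' c _ hd3, ih]
      simp [mappingScan, h1, h2, h3]
  | case5 l h =>
      match l with
      | [] => simp [rep2, mappingScan]
      | [c] => simp [rep2, mappingScan]
      | c :: d :: t => exact absurd rfl (h c d t)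

-- ===== VERDICT (by name: the statement is the Claim_ definition above) =====
theorem mapping_spec : Claim_equal_mapping := by
  unfold Claim_equal_mapping
  intro s _
  unfold Spec_mapping mapping mapping_alt
  apply String.toList_inj.mp
  simp only [List.foldl, PySem.Str.toList_replace, String.toList_ofList]
  have e1 : ("!=" : String).toList = ['!', '='] := by decide
  have e2 : ("≠" : String).toList = ['≠'] := by decide
  have e3 : ("<=" : String).toList = ['<', '='] := by decide
  have e4 : ("≤" : String).toList = ['≤'] := by decide
  have e5 : (">=" : String).toList = ['>', '='] := by decide
  have e6 : ("≥" : String).toList = ['≥'] := by decide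
  rw [e1, e2, e3, e4, e5, e6, replace_eq_rep2, replace_eq_rep2, replace_eq_rep2,
      rep3_eq_scan]
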